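-- pv_equiv track=rewrite | github.com/GinKun-project/DSA-Coursework | question1(a).py | most_utilized_class
-- ===== SOURCE A (Python) =====
-- def most_utilized_class(n, classes):
--
--     classes.sort(key=lambda x: (x[0], -x[2]))
--
--
--     room_end_time = [0] * n
--     room_count = [0] * n
--
--
--     for start, end, students in classes:
--
--         earliest_room = 0
--         for i in range(1, n):
--             if room_end_time[i] < room_end_time[earliest_room]:
--                 earliest_room = i
--
--         if room_end_time[earliest_room] <= start:
--             room_end_time[earliest_room] = end
--         else:
--
--             room_end_time[earliest_room] += (end - start)
--
--
--         room_count[earliest_room] += 1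
--
--
--     max_classes = max(room_count)
--     for i in range(n):
--         if room_count[i] == max_classes:
--             return i
-- ===== SOURCE B (Python) =====
-- def _insort(rooms, item):
--     # insert item into the sorted list `rooms`, keeping it sorted
--     for j, r in enumerate(rooms):
--         if item < r:
--             rooms.insert(j, item)
--             return
--     rooms.append(item)
--
--
-- def most_utilized_class(n, classes):
--     order = sorted(classes, key=lambda x: (x[0], -x[2]))
--     # rooms kept sorted by (end_time, index): head = room picked by the greedy rule
--     rooms = [(0, i) for i in range(n)]
--     count = [0] * n
--     for start, end, _students in order:
--         end_time, i = rooms.pop(0)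
--         if end_time <= start:
--             new_end = end
--         else:
--             new_end = end_time + (end - start)
--         _insort(rooms, (new_end, i))
--         count[i] += 1
--     best = max(count)
--     return count.index(best)
-- ===== Notes on version B (the rewrite author's own statement) =====
-- stated objective: alternative
-- what changed: Instead of rescanning all n rooms for the minimum end time at every class, B keeps the rooms in a list sorted by (end_time, index), pops the head as the earliest-free room and reinserts it with its updated end time; the final answer uses max(count)+count.index instead of a manual max-then-scan loop.
import Mathlib
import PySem

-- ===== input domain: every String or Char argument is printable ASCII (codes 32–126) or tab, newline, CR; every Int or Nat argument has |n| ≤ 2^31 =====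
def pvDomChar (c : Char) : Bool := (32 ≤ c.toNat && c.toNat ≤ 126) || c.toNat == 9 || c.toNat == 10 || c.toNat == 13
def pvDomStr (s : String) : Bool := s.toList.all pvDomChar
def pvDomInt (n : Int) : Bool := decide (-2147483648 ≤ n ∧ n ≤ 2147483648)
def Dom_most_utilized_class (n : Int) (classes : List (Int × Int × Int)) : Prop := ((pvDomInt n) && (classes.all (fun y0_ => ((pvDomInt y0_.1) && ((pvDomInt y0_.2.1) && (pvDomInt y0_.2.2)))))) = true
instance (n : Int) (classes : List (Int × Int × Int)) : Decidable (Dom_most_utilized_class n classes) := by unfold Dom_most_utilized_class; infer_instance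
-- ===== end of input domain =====

-- B replaces A's per-class argmin scan over the rooms by a room list kept sorted by (end_time, index):
-- pop the head (the earliest-free room), reinsert it with the new end time (objective: alternative).
-- A sorts `classes` in place (B does not mutate it); the equivalence proved here is about the return value.

-- ===== PORT A =====
-- inner loop: earliest_room = argmin scan over range(1, n)
def pvScanA (n : Int) (et : List Int) : Int :=
  (PySem.List.pyRange 1 n 1).foldl
    (fun best i => if PySem.List.pyGetD et i 0 < PySem.List.pyGetD et best 0 then i else best) 0

-- body of A's `for start, end, students in classes` loop; st = (room_end_time, room_count)
def pvStepA (n : Int) (st : List Int × List Int) (c : Int × Int × Int) : List Int × List Int :=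
  let earliest := pvScanA n st.1
  let et' := if PySem.List.pyGetD st.1 earliest 0 ≤ c.1
    then PySem.List.pySetD st.1 earliest c.2.1
    else PySem.List.pySetD st.1 earliest (PySem.List.pyGetD st.1 earliest 0 + (c.2.1 - c.1))
  (et', PySem.List.pySetD st.2 earliest (PySem.List.pyGetD st.2 earliest 0 + 1))

def most_utilized_class (n : Int) (classes : List (Int × Int × Int)) : Int :=
  let cls := PySem.List.sorted2 classes (fun x => x.1) (fun x => -x.2.2)
  let st := cls.foldl (pvStepA n) (PySem.List.pyRepeat [0] n, PySem.List.pyRepeat [0] n)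
  let maxClasses := (PySem.List.max? st.2 (fun x => x)).getD 0
  -- final `for i in range(n): if room_count[i] == max_classes: return i`; the getD 0 is unreachable
  ((PySem.List.pyRange 0 n 1).find? (fun i => PySem.List.pyGetD st.2 i 0 == maxClasses)).getD 0

-- ===== PORT B =====
-- _insort: first position whose element is lexicographically greater; Python's tuple `<` is
-- lexicographic, written out componentwise here (exact for pairs of ints)
def pvInsortB (item : Int × Int) : List (Int × Int) → List (Int × Int)
  | [] => [item]
  | r :: rs =>
    if item.1 < r.1 ∨ (item.1 = r.1 ∧ item.2 < r.2) then item :: r :: rs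
    else r :: pvInsortB item rs

-- body of B's loop; st = (rooms sorted by (end_time, index), count)
def pvStepB (st : List (Int × Int) × List Int) (c : Int × Int × Int) : List (Int × Int) × List Int :=
  match PySem.List.pop? st.1 0 with
  | none => st   -- rooms.pop(0) raises IndexError here (only when n ≤ 0); outside Pre_
  | some ((t, i), rest) =>
    let newEnd := if t ≤ c.1 then c.2.1 else t + (c.2.1 - c.1)
    (pvInsortB (newEnd, i) rest, PySem.List.pySetD st.2 i (PySem.List.pyGetD st.2 i 0 + 1))

def most_utilized_class_alt (n : Int) (classes : List (Int × Int × Int)) : Int :=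
  let order := PySem.List.sorted2 classes (fun x => x.1) (fun x => -x.2.2)
  let st := order.foldl pvStepB
    ((PySem.List.pyRange 0 n 1).map (fun i => ((0 : Int), i)), PySem.List.pyRepeat [0] n)
  let best := (PySem.List.max? st.2 (fun x => x)).getD 0
  (((PySem.List.index? st.2 best).getD 0 : Nat) : Int)

-- ===== PRECONDITION & SPEC =====
-- A raises for n ≤ 0 (IndexError on room_end_time[0], or ValueError from max([]) when classes = []);
-- Pre_ excludes exactly those inputs.
def Pre_most_utilized_class (n : Int) (classes : List (Int × Int × Int)) : Prop := 1 ≤ n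
instance (n : Int) (classes : List (Int × Int × Int)) : Decidable (Pre_most_utilized_class n classes) := by
  unfold Pre_most_utilized_class; infer_instance

def pvWitness_most_utilized_class : Int × (List (Int × Int × Int)) := (2, [(0, 3, 10), (1, 4, 5), (3, 5, 7)])

def Spec_most_utilized_class (n : Int) (classes : List (Int × Int × Int)) (out : Int) : Prop :=
  out = most_utilized_class_alt n classes
instance (n : Int) (classes : List (Int × Int × Int)) (out : Int) : Decidable (Spec_most_utilized_class n classes out) := by
  unfold Spec_most_utilized_class; infer_instance

-- ===== CLAIM (what is proved, stated in full; the proofs are below) =====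
def Claim_equal_most_utilized_class : Prop := ∀ (n : Int) (classes : List (Int × Int × Int)), Dom_most_utilized_class n classes → Pre_most_utilized_class n classes → Spec_most_utilized_class n classes (most_utilized_class n classes)

-- ===== LEMMAS AND PROOFS =====

-- lexicographic strict order on (end_time, index) pairs = Python's tuple `<`
def pvLexLt (a b : Int × Int) : Prop := a.1 < b.1 ∨ (a.1 = b.1 ∧ a.2 < b.2)

-- the multiset of rooms of A's state, as (end_time, index) pairs
def pvPairsOf (et : List Int) : List (Int × Int) :=
  (PySem.List.pyRange 0 (et.length : Int) 1).map (fun j => (PySem.List.pyGetD et j 0, j))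

-- the invariant linking A's state (end-time array, counts) to B's (sorted room list, counts)
def pvInv (n : Int) (a : List Int × List Int) (b : List (Int × Int) × List Int) : Prop :=
  a.2 = b.2 ∧ ((a.1.length : Int) = n) ∧ ((a.2.length : Int) = n) ∧
    b.1.Perm (pvPairsOf a.1) ∧ b.1.Pairwise pvLexLt

theorem pvMem_pairsOf (et : List Int) (p : Int × Int) :
    p ∈ pvPairsOf et ↔ ∃ j : Int, 0 ≤ j ∧ j < (et.length : Int) ∧ p = (PySem.List.pyGetD et j 0, j) := by
  simp only [pvPairsOf, List.mem_map, PySem.List.mem_pyRange_one]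
  constructor
  · rintro ⟨j, ⟨h0, h1⟩, rfl⟩; exact ⟨j, h0, h1, rfl⟩
  · rintro ⟨j, h0, h1, rfl⟩; exact ⟨j, ⟨h0, h1⟩, rfl⟩

theorem pvScanA_spec (n : Int) (et : List Int) (hn : 1 ≤ n) :
    (0 ≤ pvScanA n et ∧ pvScanA n et < n) ∧
    ∀ j : Int, 0 ≤ j → j < n →
      (PySem.List.pyGetD et (pvScanA n et) 0 < PySem.List.pyGetD et j 0 ∨
       (PySem.List.pyGetD et (pvScanA n et) 0 = PySem.List.pyGetD et j 0 ∧ pvScanA n et ≤ j)) := by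
  have key : ∀ k : Int, 1 ≤ k →
      (0 ≤ pvScanA k et ∧ pvScanA k et < k) ∧
      ∀ j : Int, 0 ≤ j → j < k →
        (PySem.List.pyGetD et (pvScanA k et) 0 < PySem.List.pyGetD et j 0 ∨
         (PySem.List.pyGetD et (pvScanA k et) 0 = PySem.List.pyGetD et j 0 ∧ pvScanA k et ≤ j)) := by
    intro k hk
    induction k, hk using Int.le_induction with
    | base =>
      constructor
      · unfold pvScanA
        rw [PySem.List.pyRange_one_eq_nil (by omega)]
        simp
      · intro j h0 h1
        have : j = 0 := by omega
        subst this
        unfold pvScanA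
        rw [PySem.List.pyRange_one_eq_nil (by omega)]
        simp
    | succ k hk ih =>
      have hstep : pvScanA (k + 1) et =
          (if PySem.List.pyGetD et k 0 < PySem.List.pyGetD et (pvScanA k et) 0 then k
           else pvScanA k et) := by
        unfold pvScanA
        rw [PySem.List.pyRange_one_succ_right (by omega)]
        rw [List.foldl_append]
        simp
      rcases ih with ⟨⟨hb0, hb1⟩, hmin⟩
      rw [hstep]
      split
      · rename_i hlt
        refine ⟨⟨by omega, by omega⟩, ?_⟩
        intro j h0 h1
        by_cases hj : j < k
        · rcases hmin j h0 hj with h | h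
          · left; omega
          · left; omega
        · have hj' : j = k := by omega
          subst hj'
          right; exact ⟨rfl, le_refl _⟩
      · rename_i hnlt
        refine ⟨⟨hb0, by omega⟩, ?_⟩
        intro j h0 h1
        by_cases hj : j < k
        · exact hmin j h0 hj
        · have hj' : j = k := by omega
          subst hj'
          have hle := not_lt.mp hnlt
          rcases lt_or_eq_of_le hle with h | h
          · exact Or.inl h
          · exact Or.inr ⟨h, by omega⟩
  exact key n hn

theorem pvHead_min (n : Int) (et : List Int) (hn : 1 ≤ n) (hlen : (et.length : Int) = n)
    (rooms : List (Int × Int)) (hperm : rooms.Perm (pvPairsOf et)) (hsort : rooms.Pairwise pvLexLt) :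
    ∃ rest, rooms = (PySem.List.pyGetD et (pvScanA n et) 0, pvScanA n et) :: rest := by
  obtain ⟨⟨hm0, hm1⟩, hmin⟩ := pvScanA_spec n et hn
  have hmmem : (PySem.List.pyGetD et (pvScanA n et) 0, pvScanA n et) ∈ rooms := by
    rw [hperm.mem_iff, pvMem_pairsOf]
    exact ⟨pvScanA n et, hm0, by omega, rfl⟩
  cases rooms with
  | nil => simp at hmmem
  | cons h rest =>
    refine ⟨rest, ?_⟩
    have hhmem : h ∈ pvPairsOf et := hperm.mem_iff.mp (by simp)
    rw [pvMem_pairsOf] at hhmem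
    obtain ⟨j, hj0, hj1, rfl⟩ := hhmem
    rcases List.mem_cons.mp hmmem with he | hrest
    · rw [he]
    · exfalso
      have hlt := (List.pairwise_cons.mp hsort).1 _ hrest
      rcases hmin j hj0 (by omega) with hc | hc <;>
        (unfold pvLexLt at hlt; omega)

theorem pvPairsOf_pySetD (et : List Int) (m v : Int) (h0 : 0 ≤ m) (h1 : m < (et.length : Int)) :
    pvPairsOf (PySem.List.pySetD et m v)
      = (pvPairsOf et).map (fun p => if p.2 = m then (v, m) else p) := by
  unfold pvPairsOf
  rw [PySem.List.length_pySetD, List.map_map]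
  refine List.map_congr_left ?_
  intro j hj
  rcases (PySem.List.mem_pyRange_one).mp hj with ⟨hj0, hj1⟩
  simp only [Function.comp]
  rw [PySem.List.pySetD_of_nonneg et v h0]
  have hjl : j < (((et.set m.toNat v).length : Nat) : Int) := by simpa using hj1
  rw [PySem.List.pyGetD_eq_getElem _ 0 hj0 hjl, PySem.List.pyGetD_eq_getElem et 0 hj0 hj1]
  rw [List.getElem_set]
  by_cases hjm : j = m
  · subst hjm; simp
  · have hne : ¬ (m.toNat = j.toNat) := by omega
    simp [hne, hjm]

theorem pvInsortB_perm (x : Int × Int) (l : List (Int × Int)) : (pvInsortB x l).Perm (x :: l) := by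
  induction l with
  | nil => simp [pvInsortB]
  | cons r rs ih =>
    simp only [pvInsortB]
    split
    · exact List.Perm.refl _
    · exact ((ih.cons r).trans (List.Perm.swap x r rs))

theorem pvInsortB_sorted (x : Int × Int) (l : List (Int × Int))
    (hs : l.Pairwise pvLexLt) (hne : ∀ y ∈ l, x.2 ≠ y.2) :
    (pvInsortB x l).Pairwise pvLexLt := by
  induction l with
  | nil => simp [pvInsortB]
  | cons r rs ih =>
    rcases List.pairwise_cons.mp hs with ⟨hr, hrs⟩
    simp only [pvInsortB]
    split
    · rename_i hlt
      refine List.pairwise_cons.mpr ⟨?_, hs⟩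
      intro z hz
      rcases List.mem_cons.mp hz with rfl | hz
      · exact hlt
      · have := hr z hz
        unfold pvLexLt at *; omega
    · rename_i hnlt
      have hrx : pvLexLt r x := by
        have := hne r (by simp)
        unfold pvLexLt at *
        omega
      refine List.pairwise_cons.mpr ⟨?_, ih hrs (fun y hy => hne y (by simp [hy]))⟩
      intro z hz
      have : z = x ∨ z ∈ rs := by
        have := (pvInsortB_perm x rs).mem_iff.mp hz
        simpa using this
      rcases this with rfl | hz'
      · exact hrx
      · exact hr z hz'

theorem pvStep_inv (n : Int) (hn : 1 ≤ n) (a : List Int × List Int) (b : List (Int × Int) × List Int)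
    (h : pvInv n a b) (c : Int × Int × Int) : pvInv n (pvStepA n a c) (pvStepB b c) := by
  rcases h with ⟨hcnt, hlen, hclen, hperm, hsort⟩
  obtain ⟨rest, hrooms⟩ := pvHead_min n a.1 hn hlen b.1 hperm hsort
  obtain ⟨⟨hm0, hm1⟩, -⟩ := pvScanA_spec n a.1 hn
  set m := pvScanA n a.1 with hmdef
  set t := PySem.List.pyGetD a.1 m 0 with htdef
  set v : Int := if t ≤ c.1 then c.2.1 else t + (c.2.1 - c.1) with hvdef
  -- A's updated end-time array is a single set at m
  have hA1 : (pvStepA n a c).1 = PySem.List.pySetD a.1 m v := by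
    unfold pvStepA; simp only [← hmdef, ← htdef, hvdef]
    split <;> simp_all
  have hA2 : (pvStepA n a c).2 = PySem.List.pySetD a.2 m (PySem.List.pyGetD a.2 m 0 + 1) := rfl
  have hB : pvStepB b c =
      (pvInsortB (v, m) rest, PySem.List.pySetD b.2 m (PySem.List.pyGetD b.2 m 0 + 1)) := by
    unfold pvStepB
    rw [hrooms, PySem.List.pop?_zero_cons]
  -- the index m does not occur in rest
  have hnodup : (b.1.map Prod.snd).Nodup := by
    refine (List.Perm.nodup_iff (hperm.map Prod.snd)).mpr ?_
    have : (pvPairsOf a.1).map Prod.snd = PySem.List.pyRange 0 (a.1.length : Int) 1 := by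
      unfold pvPairsOf; rw [List.map_map]
      simp [Function.comp_def]
    rw [this]
    exact PySem.List.nodup_pyRange_one 0 _
  have hmrest : ∀ p ∈ rest, p.2 ≠ m := by
    intro p hp hpm
    rw [hrooms] at hnodup
    simp only [List.map_cons, List.nodup_cons] at hnodup
    exact hnodup.1 (by rw [← hpm]; exact List.mem_map_of_mem hp)
  refine ⟨?_, ?_, ?_, ?_, ?_⟩
  · rw [hA2, hB, hcnt]
  · rw [hA1, PySem.List.length_pySetD]; exact hlen
  · rw [hA2, PySem.List.length_pySetD]; exact hclen
  · rw [hA1, hB]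
    simp only []
    rw [pvPairsOf_pySetD a.1 m v hm0 (by omega)]
    have h2 : rest.map (fun p => if p.2 = m then (v, m) else p) = rest := by
      refine List.map_congr_left ?_ |>.trans (List.map_id rest)
      intro p hp
      simp [hmrest p hp]
    have hmap := hperm.map (fun p => if p.2 = m then (v, m) else p)
    rw [hrooms] at hmap
    simp only [List.map_cons, h2] at hmap
    exact (pvInsortB_perm (v, m) rest).trans hmap
  · rw [hB]
    simp only []
    refine pvInsortB_sorted (v, m) rest ?_ ?_
    · exact (List.pairwise_cons.mp (hrooms ▸ hsort)).2
    · intro y hy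
      exact fun hxy => (hmrest y hy) (by omega)

theorem pvFold_inv (n : Int) (hn : 1 ≤ n) (cls : List (Int × Int × Int))
    (a : List Int × List Int) (b : List (Int × Int) × List Int) (h : pvInv n a b) :
    pvInv n (cls.foldl (pvStepA n) a) (cls.foldl pvStepB b) := by
  induction cls generalizing a b with
  | nil => exact h
  | cons c cs ih => exact ih _ _ (pvStep_inv n hn a b h c)

theorem pvInit_inv (n : Int) (hn : 1 ≤ n) :
    pvInv n (PySem.List.pyRepeat [0] n, PySem.List.pyRepeat [0] n)
      ((PySem.List.pyRange 0 n 1).map (fun i => ((0 : Int), i)), PySem.List.pyRepeat [0] n) := by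
  have hrep : PySem.List.pyRepeat ([0] : List Int) n = List.replicate n.toNat 0 :=
    PySem.List.pyRepeat_singleton (0 : Int) n
  have hlen : ((PySem.List.pyRepeat ([0] : List Int) n).length : Int) = n := by
    rw [hrep, List.length_replicate]; omega
  refine ⟨rfl, hlen, hlen, ?_, ?_⟩
  · have : pvPairsOf (PySem.List.pyRepeat ([0] : List Int) n)
        = (PySem.List.pyRange 0 n 1).map (fun i => ((0 : Int), i)) := by
      rw [hrep]
      unfold pvPairsOf
      simp only [List.length_replicate]
      have hcast : ((n.toNat : Nat) : Int) = n := by omega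
      rw [hcast]
      refine List.map_congr_left ?_
      intro j hj
      rcases (PySem.List.mem_pyRange_one).mp hj with ⟨hj0, hj1⟩
      rw [PySem.List.pyGetD_eq_getElem _ 0 hj0 (by simp; omega)]
      simp
    rw [this]
  · refine List.Pairwise.map _ ?_ (PySem.List.pairwise_lt_pyRange_one 0 n)
    intro a b hab
    exact Or.inr ⟨rfl, hab⟩

theorem pvFind_range (n : Int) (p : Int → Bool) (k : Nat) (hk : (k : Int) < n)
    (hpk : p k = true) (hlt : ∀ j : Int, 0 ≤ j → j < k → p j = false) :
    (PySem.List.pyRange 0 n 1).find? p = some (k : Int) := by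
  rw [PySem.List.pyRange_one_append 0 (k : Int) n (Int.natCast_nonneg k) (le_of_lt hk)]
  rw [List.find?_append]
  have h1 : (PySem.List.pyRange 0 (k : Int) 1).find? p = none := by
    rw [List.find?_eq_none]
    intro x hx
    rcases (PySem.List.mem_pyRange_one).mp hx with ⟨hx0, hx1⟩
    simp [hlt x hx0 hx1]
  rw [h1, PySem.List.pyRange_one_cons hk]
  simp [hpk]

theorem pvFinal_eq (n : Int) (hn : 1 ≤ n) (cnt : List Int) (hlen : (cnt.length : Int) = n) :
    (((PySem.List.pyRange 0 n 1).find?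
        (fun i => PySem.List.pyGetD cnt i 0 == (PySem.List.max? cnt (fun x => x)).getD 0)).getD 0)
      = (((PySem.List.index? cnt ((PySem.List.max? cnt (fun x => x)).getD 0)).getD 0 : Nat) : Int) := by
  have hne : cnt ≠ [] := by
    intro h; rw [h] at hlen; simp at hlen; omega
  obtain ⟨mx, hmx⟩ : ∃ mx, PySem.List.max? cnt (fun x => x) = some mx := by
    cases hmax : PySem.List.max? cnt (fun x => x) with
    | none => exact absurd ((PySem.List.max?_eq_none_iff _ _).mp hmax) hne
    | some mx => exact ⟨mx, rfl⟩
  have hmem : mx ∈ cnt := PySem.List.max?_mem hmx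
  obtain ⟨k, hk⟩ : ∃ k, PySem.List.index? cnt mx = some k :=
    Option.isSome_iff_exists.mp ((PySem.List.index?_isSome_iff cnt mx).mpr hmem)
  obtain ⟨hklt, hkv, hprev⟩ := PySem.List.getElem_of_index?_eq_some hk
  rw [hmx]
  simp only [Option.getD_some]
  rw [hk]
  simp only [Option.getD_some]
  rw [pvFind_range n (fun i => PySem.List.pyGetD cnt i 0 == mx) k (by omega)
    (by
      show (PySem.List.pyGetD cnt ((k : Nat) : Int) 0 == mx) = true
      rw [PySem.List.pyGetD_eq_getElem cnt 0 (Int.natCast_nonneg k)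
        (by exact_mod_cast Int.ofNat_lt.mpr hklt)]
      simp only [Int.toNat_natCast]
      simp [hkv])
    (by
      intro j hj0 hj1
      show (PySem.List.pyGetD cnt j 0 == mx) = false
      rw [PySem.List.pyGetD_eq_getElem cnt 0 hj0 (by omega)]
      have hjk : j.toNat < k := by omega
      simp [hprev j.toNat hjk])]
  simp

-- ===== VERDICT (by name: the statement is the Claim_ definition above) =====
theorem most_utilized_class_spec : Claim_equal_most_utilized_class := by
  intro n classes _ hpre
  unfold Spec_most_utilized_class most_utilized_class most_utilized_class_alt
  have hn : 1 ≤ n := hpre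
  have hinv := pvFold_inv n hn (PySem.List.sorted2 classes (fun x => x.1) (fun x => -x.2.2))
    _ _ (pvInit_inv n hn)
  rcases hinv with ⟨hcnt, _, hclen, _, _⟩
  simp only []
  rw [← hcnt]
  exact pvFinal_eq n hn _ hclen
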